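-- pv_equiv track=rewrite | github.com/francescacarlon/thesis_project | benchmark_creation.py | is_valid_existing_text
-- ===== SOURCE A (Python) =====
-- def has_long_dash_run(text, threshold=20):
--     max_run = 0
--     current_run = 0
--     for char in text:
--         if char == '-':
--             current_run += 1
--             max_run = max(max_run, current_run)
--         else:
--             current_run = 0
--     return max_run >= threshold
--
-- def is_valid_existing_text(text, dash_threshold=20, min_word_count=100, min_char_count=30):
--     if text is None or text.strip() in {"", "FAILED", "None", "#"}:
--         return False
--     text = text.strip()
--     if len(text) < min_char_count or len(text.split()) < min_word_count:
--         return False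
--     if has_long_dash_run(text, threshold=dash_threshold):
--         return False
--     if any(text.endswith(marker) for marker in {"...", "END OF OUTPUT", "### END OF INPUT ###", "### END OF FILE ###"}):
--         return False
--     if "Original text:" in text and text.count("Original text:") > 1:
--         return False
--     return True
-- ===== SOURCE B (Python) =====
-- def is_valid_existing_text(text, dash_threshold=20, min_word_count=100, min_char_count=30):
--     if text is None:
--         return False
--     t = text.strip()
--     if t in ("", "FAILED", "None", "#"):
--         return False
--     # single fused scan over t: count words and detect a long dash run in one pass,
--     # instead of a split() pass plus a separate run-length loop
--     words = 0
--     run = 0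
--     long_dash = False
--     prev_space = True
--     for ch in t:
--         if ch.isspace():
--             run = 0
--             prev_space = True
--         else:
--             if prev_space:
--                 words += 1
--             run = run + 1 if ch == '-' else 0
--             if run >= dash_threshold:
--                 long_dash = True
--             prev_space = False
--     if len(t) < min_char_count or words < min_word_count or long_dash:
--         return False
--     if t.endswith(("...", "END OF OUTPUT", "### END OF INPUT ###", "### END OF FILE ###")):
--         return False
--     return not ("Original text:" in t and t.count("Original text:") > 1)
-- ===== Notes on version B (the rewrite author's own statement) =====
-- stated objective: alternative
-- what changed: A's staged passes (split() to count words plus a separate run-length loop over the whole text) are replaced by one fused character scan that counts word starts and detects a long dash run simultaneously with a small state machine (words, run, prev_space, long_dash).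
import Mathlib
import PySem

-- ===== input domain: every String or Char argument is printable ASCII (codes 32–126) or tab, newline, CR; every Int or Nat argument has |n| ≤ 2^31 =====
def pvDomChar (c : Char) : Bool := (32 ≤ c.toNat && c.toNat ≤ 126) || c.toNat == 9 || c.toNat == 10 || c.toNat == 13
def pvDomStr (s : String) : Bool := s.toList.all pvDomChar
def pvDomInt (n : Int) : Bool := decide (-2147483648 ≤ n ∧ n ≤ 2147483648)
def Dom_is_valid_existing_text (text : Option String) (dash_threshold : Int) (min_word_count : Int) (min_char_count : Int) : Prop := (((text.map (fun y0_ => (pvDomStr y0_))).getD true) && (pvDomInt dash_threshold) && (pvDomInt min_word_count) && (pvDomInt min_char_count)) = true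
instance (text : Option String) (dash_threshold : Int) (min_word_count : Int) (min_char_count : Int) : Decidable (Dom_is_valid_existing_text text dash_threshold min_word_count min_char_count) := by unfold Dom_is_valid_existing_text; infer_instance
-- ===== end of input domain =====

-- B fuses A's staged passes (split() for the word count plus a separate dash run-length
-- loop) into ONE character scan with a small state machine (alternative; same cost).

-- ===== PORT A =====
def has_long_dash_run (text : String) (threshold : Int) : Bool :=
  -- the loop: state (max_run, current_run); returns max_run >= threshold
  decide (threshold ≤ (text.toList.foldl
    (fun (st : Int × Int) ch =>
      if ch = '-' then (max st.1 (st.2 + 1), st.2 + 1) else (st.1, (0 : Int)))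
    ((0 : Int), (0 : Int))).1)

def is_valid_existing_text (text : Option String) (dash_threshold : Int) (min_word_count : Int) (min_char_count : Int) : Bool :=
  match text with
  | none => false
  | some s =>
    if ["", "FAILED", "None", "#"].contains (PySem.Str.strip s) then false
    else
      let t := PySem.Str.strip s
      if decide ((PySem.Str.len t : Int) < min_char_count) || decide (((PySem.Str.split₀ t).length : Int) < min_word_count) then false
      else if has_long_dash_run t dash_threshold then false
      else if PySem.Str.endswith t "..." || PySem.Str.endswith t "END OF OUTPUT" || PySem.Str.endswith t "### END OF INPUT ###" || PySem.Str.endswith t "### END OF FILE ###" then false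
      else if PySem.Str.isIn "Original text:" t && decide ((1 : Int) < (PySem.Str.count t "Original text:" : Int)) then false
      else true

-- ===== PORT B =====
-- one fused scan; state (words, run, long_dash, prev_space)
def is_valid_existing_text_alt (text : Option String) (dash_threshold : Int) (min_word_count : Int) (min_char_count : Int) : Bool :=
  match text with
  | none => false
  | some s =>
    let t := PySem.Str.strip s
    if ["", "FAILED", "None", "#"].contains t then false
    else
      let st := t.toList.foldl
        (fun (st : Nat × Int × Bool × Bool) ch =>
          if PySem.Chars.isspace ch then (st.1, 0, st.2.2.1, true)
          else
            let w := if st.2.2.2 then st.1 + 1 else st.1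
            let run := if ch = '-' then st.2.1 + 1 else 0
            (w, run, st.2.2.1 || decide (dash_threshold ≤ run), false))
        ((0 : Nat), (0 : Int), false, true)
      if decide ((PySem.Str.len t : Int) < min_char_count) || decide ((st.1 : Int) < min_word_count) || st.2.2.1 then false
      else if PySem.Str.endswith t "..." || PySem.Str.endswith t "END OF OUTPUT" || PySem.Str.endswith t "### END OF INPUT ###" || PySem.Str.endswith t "### END OF FILE ###" then false
      else !(PySem.Str.isIn "Original text:" t && decide ((1 : Int) < (PySem.Str.count t "Original text:" : Int)))

-- ===== PRECONDITION & SPEC =====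
def Spec_is_valid_existing_text (text : Option String) (dash_threshold : Int) (min_word_count : Int) (min_char_count : Int) (out : Bool) : Prop := out = is_valid_existing_text_alt text dash_threshold min_word_count min_char_count
instance (text : Option String) (dash_threshold : Int) (min_word_count : Int) (min_char_count : Int) (out : Bool) : Decidable (Spec_is_valid_existing_text text dash_threshold min_word_count min_char_count out) := by unfold Spec_is_valid_existing_text; infer_instance

-- ===== CLAIM (what is proved, stated in full; the proofs are below) =====
def Claim_equal_is_valid_existing_text : Prop := ∀ (text : Option String) (dash_threshold : Int) (min_word_count : Int) (min_char_count : Int), Dom_is_valid_existing_text text dash_threshold min_word_count min_char_count → Spec_is_valid_existing_text text dash_threshold min_word_count min_char_count (is_valid_existing_text text dash_threshold min_word_count min_char_count)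

-- ===== LEMMAS AND PROOFS =====

-- max dash run seen by A's loop, with the current run already c long
def gRun : Nat → List Char → Nat
  | _, [] => 0
  | c, ch :: rest => if ch = '-' then max (c + 1) (gRun (c + 1) rest) else gRun 0 rest

-- word count of B's scan: number of space→non-space transitions, prev_space = ps
def wc : Bool → List Char → Nat
  | _, [] => 0
  | ps, ch :: rest =>
    if PySem.Chars.isspace ch then wc true rest
    else (if ps then 1 else 0) + wc false rest

-- long-dash flag of B's scan, current run = run
def longRun (thr : Int) : Int → List Char → Bool
  | _, [] => false
  | run, ch :: rest =>
    if PySem.Chars.isspace ch then longRun thr 0 rest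
    else
      let run' := if ch = '-' then run + 1 else 0
      decide (thr ≤ run') || longRun thr run' rest

lemma loop_fst (l : List Char) : ∀ (m c : Nat),
    (l.foldl (fun (st : Int × Int) ch =>
        if ch = '-' then (max st.1 (st.2 + 1), st.2 + 1) else (st.1, (0 : Int)))
      ((m : Int), (c : Int))).1 = ((max m (gRun c l) : Nat) : Int) := by
  induction l with
  | nil => intro m c; simp [gRun]
  | cons ch rest ih =>
    intro m c
    rw [List.foldl_cons]
    by_cases h : ch = '-'
    · rw [if_pos h]
      have H := ih (max m (c + 1)) (c + 1)
      push_cast [Nat.cast_max] at H ⊢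
      rw [H]
      simp only [gRun, if_pos h]
      push_cast [Nat.cast_max]
      omega
    · rw [if_neg h]
      have H := ih m 0
      simp only [Nat.cast_zero] at H
      rw [H]
      simp [gRun, h]

-- B's fold computes exactly (wc, ·, longRun, ·) from any start state
lemma fold_spec (thr : Int) (l : List Char) : ∀ (w : Nat) (run : Int) (long ps : Bool),
    (l.foldl
      (fun (st : Nat × Int × Bool × Bool) ch =>
        if PySem.Chars.isspace ch then (st.1, 0, st.2.2.1, true)
        else
          let w := if st.2.2.2 then st.1 + 1 else st.1
          let run := if ch = '-' then st.2.1 + 1 else 0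
          (w, run, st.2.2.1 || decide (thr ≤ run), false))
      (w, run, long, ps)).1 = w + wc ps l
    ∧ (l.foldl
      (fun (st : Nat × Int × Bool × Bool) ch =>
        if PySem.Chars.isspace ch then (st.1, 0, st.2.2.1, true)
        else
          let w := if st.2.2.2 then st.1 + 1 else st.1
          let run := if ch = '-' then st.2.1 + 1 else 0
          (w, run, st.2.2.1 || decide (thr ≤ run), false))
      (w, run, long, ps)).2.2.1 = (long || longRun thr run l) := by
  induction l with
  | nil => intro w run long ps; simp [wc, longRun]
  | cons ch rest ih =>
    intro w run long ps
    rw [List.foldl_cons]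
    by_cases h : PySem.Chars.isspace ch
    · simp only [if_pos h]
      rcases ih w 0 long true with ⟨h1, h2⟩
      refine ⟨?_, ?_⟩
      · rw [h1]; simp [wc, h]
      · rw [h2]; simp [longRun, h]
    · simp only [if_neg h]
      rcases ih (if ps then w + 1 else w) (if ch = '-' then run + 1 else 0)
        (long || decide (thr ≤ if ch = '-' then run + 1 else 0)) false with ⟨h1, h2⟩
      refine ⟨?_, ?_⟩
      · rw [h1]; simp only [wc, if_neg h]; split_ifs <;> omega
      · rw [h2]; simp only [longRun, if_neg h, Bool.or_assoc]

-- length of split₀'s worker = wc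
lemma go_length : ∀ (rest cur : List Char) (acc : List (List Char)),
    (PySem.Chars.split₀.go rest cur acc).length
      = acc.length + (if cur.isEmpty then 0 else 1) + wc cur.isEmpty rest := by
  intro rest
  induction rest with
  | nil =>
    intro cur acc
    by_cases hc : cur.isEmpty <;> simp [PySem.Chars.split₀.go, hc, wc]
  | cons ch r ih =>
    intro cur acc
    by_cases h : PySem.Chars.isspace ch <;> by_cases hc : cur.isEmpty <;>
      (simp [PySem.Chars.split₀.go, h, hc, ih, wc]; try omega)

lemma split₀_length (l : List Char) : (PySem.Chars.split₀ l).length = wc true l := by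
  have := go_length l [] []
  simpa [PySem.Chars.split₀] using this

-- longRun with a Nat-valued current run, for a positive threshold, reads gRun
lemma longRun_eq_gRun (thr : Int) (h1 : 1 ≤ thr) : ∀ (l : List Char) (c : Nat),
    longRun thr (c : Int) l = decide (thr ≤ ((gRun c l : Nat) : Int)) := by
  intro l
  induction l with
  | nil =>
    intro c
    simp only [longRun, gRun, Nat.cast_zero]
    have : ¬ thr ≤ (0 : Int) := by omega
    simp [this]
  | cons ch rest ih =>
    intro c
    by_cases hs : PySem.Chars.isspace ch
    · have hd : ch ≠ '-' := by
        intro he; subst he; simp [PySem.Chars.isspace] at hs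
      simp only [longRun, if_pos hs, gRun, if_neg hd]
      have := ih 0
      simpa using this
    · simp only [longRun, if_neg hs, gRun]
      by_cases hd : ch = '-'
      · simp only [if_pos hd]
        have : ((c : Int) + 1) = ((c + 1 : Nat) : Int) := by push_cast; ring
        rw [this, ih (c + 1)]
        push_cast [Nat.cast_max]
        rw [Bool.or_comm]
        rcases le_or_gt thr ((gRun (c + 1) rest : Nat) : Int) with hle | hgt
        · have hmax : thr ≤ max ((c : Int) + 1) ((gRun (c + 1) rest : Nat) : Int) :=
            le_trans hle (le_max_right _ _)
          simp [hle, hmax]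
        · have : ¬ thr ≤ ((gRun (c + 1) rest : Nat) : Int) := by omega
          simp only [this, decide_false, Bool.false_or, decide_eq_decide]
          omega
      · simp only [if_neg hd]
        have hz : ¬ thr ≤ (0 : Int) := by omega
        have := ih 0
        simp only [Nat.cast_zero] at this
        simp [hz, this]

-- the head of a stripped nonempty string is not whitespace
lemma strip_head_not_space (l : List Char) (ch : Char) (rest : List Char)
    (h : PySem.Chars.strip l = ch :: rest) : PySem.Chars.isspace ch = false := by
  have hpre : PySem.Chars.strip l <+: PySem.Chars.lstrip l := by
    unfold PySem.Chars.strip PySem.Chars.rstrip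
    have hsuf : (PySem.Chars.lstrip l).reverse.dropWhile PySem.Chars.isspace
        <:+ (PySem.Chars.lstrip l).reverse := List.dropWhile_suffix _
    have := List.reverse_prefix.mpr (by simpa using hsuf)
    simpa using this
  rw [h] at hpre
  rcases hpre with ⟨u, hu⟩
  have hmem : ch ∈ PySem.Chars.lstrip l := by rw [← hu]; simp
  unfold PySem.Chars.lstrip at hu hmem
  have hhead : (l.dropWhile PySem.Chars.isspace).head? = some ch := by
    rw [← hu]; rfl
  by_contra hsp
  have hsp' : PySem.Chars.isspace ch = true := by
    cases hx : PySem.Chars.isspace ch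
    · exact absurd hx hsp
    · rfl
  have := List.head?_dropWhile_not PySem.Chars.isspace l
  rw [hhead] at this
  simp at this
  exact absurd hsp' (by simpa using this)

-- has_long_dash_run on a stripped nonempty string equals B's fused flag
lemma dash_eq (s : String) (thr : Int)
    (hne : PySem.Str.strip s ≠ "") :
    has_long_dash_run (PySem.Str.strip s) thr
      = longRun thr 0 (PySem.Str.strip s).toList := by
  set t := PySem.Str.strip s with ht
  unfold has_long_dash_run
  rw [show ((0 : Int), (0 : Int)) = (((0 : Nat) : Int), ((0 : Nat) : Int)) from rfl, loop_fst]
  rcases le_or_gt 1 thr with h1 | h1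
  · rw [show (0 : Int) = ((0 : Nat) : Int) from rfl, longRun_eq_gRun thr h1]
    simp
  · -- thr ≤ 0: both sides are true
    have hl : t.toList ≠ [] := by
      intro he
      exact hne (String.toList_eq_nil_iff.mp he)
    have hlist : t.toList = PySem.Chars.strip s.toList := PySem.Str.toList_strip s
    cases hc : t.toList with
    | nil => exact absurd hc hl
    | cons ch rest =>
      have hns : PySem.Chars.isspace ch = false :=
        strip_head_not_space s.toList ch rest (by rw [← hlist, hc])
      have hB : longRun thr 0 (ch :: rest) = true := by
        simp only [longRun, hns, Bool.false_eq_true, if_false, Bool.or_eq_true,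
          decide_eq_true_iff]
        left; split_ifs <;> omega
      rw [hB]
      simp only [decide_eq_true_iff, Nat.cast_max, Nat.cast_zero]
      exact le_trans (by omega : thr ≤ (0 : Int)) (le_max_left _ _)

-- ===== VERDICT (by name: the statement is the Claim_ definition above) =====
set_option maxHeartbeats 1000000 in
theorem is_valid_existing_text_spec : Claim_equal_is_valid_existing_text := by
  intro text thr mw mc _
  unfold Spec_is_valid_existing_text is_valid_existing_text is_valid_existing_text_alt
  cases text with
  | none => rfl
  | some s =>
    simp only
    by_cases hmem : ["", "FAILED", "None", "#"].contains (PySem.Str.strip s)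
    · simp only [hmem]; rfl
    · simp only [hmem, if_false, Bool.false_eq_true]
      have hne : PySem.Str.strip s ≠ "" := by
        intro he; apply hmem; rw [he]; decide
      rcases fold_spec thr (PySem.Str.strip s).toList 0 0 false true with ⟨hW, hL⟩
      rw [hW, hL]
      simp only [Nat.zero_add, Bool.false_or]
      rw [← dash_eq s thr hne]
      have hwords : ((PySem.Str.split₀ (PySem.Str.strip s)).length : Int)
          = ((wc true (PySem.Str.strip s).toList : Nat) : Int) := by
        rw [PySem.Str.split₀, List.length_map, split₀_length]
      rw [← hwords]
      -- both sides are now if-chains over the same boolean atoms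
      cases h1 : decide ((PySem.Str.len (PySem.Str.strip s) : Int) < mc) <;>
      cases h2 : decide (((PySem.Str.split₀ (PySem.Str.strip s)).length : Int) < mw) <;>
      cases h3 : has_long_dash_run (PySem.Str.strip s) thr <;>
      cases h4 : (PySem.Str.endswith (PySem.Str.strip s) "..." || PySem.Str.endswith (PySem.Str.strip s) "END OF OUTPUT" || PySem.Str.endswith (PySem.Str.strip s) "### END OF INPUT ###" || PySem.Str.endswith (PySem.Str.strip s) "### END OF FILE ###") <;>
      cases h5 : (PySem.Str.isIn "Original text:" (PySem.Str.strip s) && decide ((1 : Int) < (PySem.Str.count (PySem.Str.strip s) "Original text:" : Int))) <;>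
      simp
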